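-- pv_equiv track=rewrite | github.com/LinyiHan1998/LCPractice | OA/tiktok2_4.py | minimalCost
-- ===== SOURCE A (Python) =====
-- def minimalCost(price):
--     n = len(price)
--     diff = 0
--     for i in range(n-1):
--         diff += (abs(price[i]-price[i+1]))
--     res = diff
--     for i in range(n):
--         tmp = diff
--         if i < n-1:
--             tmp -= abs(price[i]-price[i+1])
--         if i >= 1:
--             tmp -= abs(price[i]-price[i-1])
--         p = price[i]
--         p //= 2
--         if i < n-1:
--             tmp += abs(p-price[i+1])
--         if i >= 1:
--             tmp += abs(p-price[i-1])
--         res = min(res,tmp)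
--     return res
-- ===== SOURCE B (Python) =====
-- def minimalCost(price):
--     def total(a):
--         return sum(abs(a[j] - a[j + 1]) for j in range(len(a) - 1))
--     best = total(price)
--     for i in range(len(price)):
--         c = list(price)
--         c[i] = price[i] // 2
--         best = min(best, total(c))
--     return best
-- ===== Notes on version B (the rewrite author's own statement) =====
-- stated objective: simpler
-- what changed: B drops A's delta bookkeeping (subtract the two old neighbour terms, add the two halved ones, with four boundary guards): it just rebuilds a copy with price[i] halved and recomputes the full adjacent-difference sum from scratch for every i.
import Mathlib
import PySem

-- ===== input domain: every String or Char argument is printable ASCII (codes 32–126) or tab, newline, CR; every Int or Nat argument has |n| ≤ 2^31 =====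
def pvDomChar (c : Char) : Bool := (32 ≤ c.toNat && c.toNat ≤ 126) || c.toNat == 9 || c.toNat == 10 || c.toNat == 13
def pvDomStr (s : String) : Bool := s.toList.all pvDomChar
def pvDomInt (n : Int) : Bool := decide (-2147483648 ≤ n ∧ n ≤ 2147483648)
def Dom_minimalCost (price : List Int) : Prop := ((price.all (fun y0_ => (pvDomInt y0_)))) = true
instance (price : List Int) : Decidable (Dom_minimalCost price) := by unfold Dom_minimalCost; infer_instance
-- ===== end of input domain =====

-- B recomputes the whole adjacent-difference sum on a halved copy for every index,
-- replacing A's delta bookkeeping with guards; simpler, not faster (O(n^2) vs O(n)).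

-- ===== PORT A =====
-- A's guards (i < n-1, i >= 1) keep every index in range, so price[i±1] is ported as getD.
def minimalCost (price : List Int) : Int :=
  let n := price.length
  let diff := (List.range (n - 1)).foldl
    (fun d i => d + |price.getD i 0 - price.getD (i + 1) 0|) 0
  (List.range n).foldl (fun res i =>
    let tmp := diff
    let tmp := if i < n - 1 then tmp - |price.getD i 0 - price.getD (i + 1) 0| else tmp
    let tmp := if 1 ≤ i then tmp - |price.getD i 0 - price.getD (i - 1) 0| else tmp
    let p := PySem.Int.floordiv (price.getD i 0) 2
    let tmp := if i < n - 1 then tmp + |p - price.getD (i + 1) 0| else tmp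
    let tmp := if 1 ≤ i then tmp + |p - price.getD (i - 1) 0| else tmp
    min res tmp) diff

-- ===== PORT B =====
-- B's helper total(a) = sum of |a[j]-a[j+1]| over adjacent pairs.
def pvTotal (a : List Int) : Int :=
  (List.range (a.length - 1)).foldl
    (fun s j => s + |a.getD j 0 - a.getD (j + 1) 0|) 0

def minimalCost_alt (price : List Int) : Int :=
  (List.range price.length).foldl
    (fun best i =>
      min best (pvTotal (price.set i (PySem.Int.floordiv (price.getD i 0) 2))))
    (pvTotal price)

-- ===== PRECONDITION & SPEC =====
def Spec_minimalCost (price : List Int) (out : Int) : Prop := out = minimalCost_alt price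
instance (price : List Int) (out : Int) : Decidable (Spec_minimalCost price out) := by unfold Spec_minimalCost; infer_instance

-- ===== CLAIM (what is proved, stated in full; the proofs are below) =====
def Claim_equal_minimalCost : Prop := ∀ (price : List Int), Dom_minimalCost price → Spec_minimalCost price (minimalCost price)

-- ===== LEMMAS AND PROOFS =====

lemma foldl_range_add_eq_sum (f : Nat → Int) (m : Nat) :
    (List.range m).foldl (fun s j => s + f j) 0 = ∑ j ∈ Finset.range m, f j := by
  induction m with
  | zero => simp
  | succ k ih => simp [List.range_succ, Finset.sum_range_succ, ih]

lemma getD_set_same {a : List Int} {i : Nat} (hi : i < a.length) (v : Int) :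
    (a.set i v).getD i 0 = v := by
  simp [List.getD, hi]

lemma getD_set_ne {a : List Int} {i j : Nat} (h : i ≠ j) (v : Int) :
    (a.set i v).getD j 0 = a.getD j 0 := by
  simp [List.getD, h]

-- the heart: recomputing the full sum on the halved copy equals A's delta adjustment
lemma total_set (price : List Int) (i : Nat) (hi : i < price.length) (v : Int) :
    pvTotal (price.set i v) =
      pvTotal price
      + (if i < price.length - 1 then
            |v - price.getD (i + 1) 0| - |price.getD i 0 - price.getD (i + 1) 0| else 0)
      + (if 1 ≤ i then
            |v - price.getD (i - 1) 0| - |price.getD i 0 - price.getD (i - 1) 0| else 0) := by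
  unfold pvTotal
  rw [List.length_set, foldl_range_add_eq_sum, foldl_range_add_eq_sum]
  have hpt : ∀ j ∈ Finset.range (price.length - 1),
      |(price.set i v).getD j 0 - (price.set i v).getD (j + 1) 0|
        = |price.getD j 0 - price.getD (j + 1) 0|
          + (if j = i then
              |v - price.getD (i + 1) 0| - |price.getD i 0 - price.getD (i + 1) 0| else 0)
          + (if 1 ≤ i ∧ j = i - 1 then
              |v - price.getD (i - 1) 0| - |price.getD i 0 - price.getD (i - 1) 0| else 0) := by
    intro j hj
    by_cases hji : j = i
    · have h2 : ¬(1 ≤ i ∧ i = i - 1) := by omega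
      rw [hji, if_pos rfl, if_neg h2, getD_set_same hi, getD_set_ne (by omega)]
      ring
    · by_cases hj1 : 1 ≤ i ∧ j = i - 1
      · obtain ⟨h1, h2⟩ := hj1
        have hji1 : j + 1 = i := by omega
        rw [if_neg hji, if_pos ⟨h1, h2⟩, getD_set_ne (by omega), hji1,
            getD_set_same hi, h2, abs_sub_comm (price.getD (i - 1) 0) v,
            abs_sub_comm (price.getD i 0) (price.getD (i - 1) 0)]
        ring
      · rw [if_neg hji, if_neg hj1, getD_set_ne (by omega), getD_set_ne (by omega)]
        ring
  rw [Finset.sum_congr rfl hpt, Finset.sum_add_distrib, Finset.sum_add_distrib,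
      Finset.sum_ite_eq' (Finset.range (price.length - 1)) i]
  by_cases h1 : 1 ≤ i
  · have hmem : i - 1 ∈ Finset.range (price.length - 1) := by
      rw [Finset.mem_range]; omega
    calc _ = (∑ j ∈ Finset.range (price.length - 1), |price.getD j 0 - price.getD (j + 1) 0|)
            + (if i ∈ Finset.range (price.length - 1) then
                |v - price.getD (i + 1) 0| - |price.getD i 0 - price.getD (i + 1) 0| else 0)
            + (∑ j ∈ Finset.range (price.length - 1), if j = i - 1 then
                |v - price.getD (i - 1) 0| - |price.getD i 0 - price.getD (i - 1) 0| else 0) := by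
              simp only [h1, true_and]
      _ = _ := by
        rw [Finset.sum_ite_eq' (Finset.range (price.length - 1)) (i - 1), if_pos hmem,
            if_pos h1]
        simp only [Finset.mem_range]
  · simp only [h1, false_and, if_false, Finset.sum_const_zero, Finset.mem_range, add_zero]

-- A's loop body at index i, with diff already equal to the baseline total
def stepA (price : List Int) (i : Nat) : Int :=
  let n := price.length
  let diff := pvTotal price
  let tmp := diff
  let tmp := if i < n - 1 then tmp - |price.getD i 0 - price.getD (i + 1) 0| else tmp
  let tmp := if 1 ≤ i then tmp - |price.getD i 0 - price.getD (i - 1) 0| else tmp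
  let p := PySem.Int.floordiv (price.getD i 0) 2
  let tmp := if i < n - 1 then tmp + |p - price.getD (i + 1) 0| else tmp
  let tmp := if 1 ≤ i then tmp + |p - price.getD (i - 1) 0| else tmp
  tmp

lemma step_eq (price : List Int) (i : Nat) (hi : i < price.length) :
    stepA price i = pvTotal (price.set i (PySem.Int.floordiv (price.getD i 0) 2)) := by
  rw [total_set price i hi]
  unfold stepA
  by_cases h1 : i < price.length - 1 <;> by_cases h2 : 1 ≤ i <;>
    simp only [h1, h2, if_true, if_false] <;> ring

-- ===== VERDICT (by name: the statement is the Claim_ definition above) =====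
theorem minimalCost_spec : Claim_equal_minimalCost := by
  intro price _
  show minimalCost price = minimalCost_alt price
  have hA : minimalCost price
      = (List.range price.length).foldl (fun res i => min res (stepA price i))
          (pvTotal price) := rfl
  rw [hA]
  unfold minimalCost_alt
  apply PySem.List.foldl_congr_mem
  intro acc i hmem
  rw [step_eq price i (List.mem_range.mp hmem)]
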